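-- pv_equiv track=rewrite | github.com/TRASALBY/Problem-Solving | Programers/Level2/n^2 배열 자르기.py | solution
-- ===== SOURCE A (Python) =====
-- def solution(n, left, right):
--     answer = []
--     arr = [i for i in range(1,n+1)]
--
--     for i in range((left // n) + 1,(right // n) +2):
--         answer += [i]*i +arr[i:]
--
--
--     left = left % n
--     right = -(n - (right+1) % n)
--
--     if right == -n:
--         return answer[left:]
--     return answer[left:right]
-- ===== SOURCE B (Python) =====
-- def solution(n, left, right):
--     # value at flat index k of the n x n matrix is max(row, col) + 1
--     return [max(k // n, k % n) + 1 for k in range(left, right + 1)]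
-- ===== Notes on version B (the rewrite author's own statement) =====
-- stated objective: alternative
-- what changed: B computes each requested entry directly by the closed form max(k//n,k%n)+1 over range(left,right+1) instead of materialising whole n-length rows, concatenating them and slicing the result.
-- intended difference: On nonempty requests with 0 <= left <= right and right >= n*n (outside the n*n matrix, where the task leaves the value unspecified), A returns padded garbage built from wrapped rows (e.g. [2, 2] for (1,1,1)) while B returns the closed-form entry max(k//n,k%n)+1 per requested index, the intended continuation. — e.g. on solution(1, 1, 1): A returns [2, 2], B returns [2]
-- outside the precondition, e.g. on solution(1, -5, 1): A returns [1, 1, 1, 1, 1, 1, 2, 2], B returns [1, 1, 1, 1, 1, 1, 2]; on solution(-2, 0, 1): A returns [], B returns [1, 0]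
import Mathlib
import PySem

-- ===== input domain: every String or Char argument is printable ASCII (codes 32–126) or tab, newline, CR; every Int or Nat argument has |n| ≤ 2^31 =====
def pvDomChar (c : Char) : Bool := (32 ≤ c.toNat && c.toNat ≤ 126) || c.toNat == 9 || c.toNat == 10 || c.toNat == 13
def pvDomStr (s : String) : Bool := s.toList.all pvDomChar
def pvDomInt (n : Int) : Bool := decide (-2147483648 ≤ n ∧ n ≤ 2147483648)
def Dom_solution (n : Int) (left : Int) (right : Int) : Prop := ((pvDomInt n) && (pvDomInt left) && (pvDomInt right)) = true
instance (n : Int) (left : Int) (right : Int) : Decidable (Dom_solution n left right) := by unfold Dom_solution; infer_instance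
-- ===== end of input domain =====

-- B replaces A's row-building-and-slicing by the closed-form entry max(k//n, k%n)+1 per requested index (a different algorithm; return value only, no arguments are mutated).


-- ===== PORT A =====
def solution (n : Int) (left : Int) (right : Int) : List Int :=
  -- arr = [i for i in range(1, n+1)]
  let arr : List Int := PySem.List.pyRange 1 (n + 1) 1
  -- for i in range((left // n) + 1, (right // n) + 2): answer += [i]*i + arr[i:]
  let answer : List Int :=
    (PySem.List.pyRange (PySem.Int.floordiv left n + 1) (PySem.Int.floordiv right n + 2) 1).foldl
      (fun acc i => acc ++ (List.replicate i.toNat i ++ PySem.List.slice arr (some i) none)) []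
  -- left = left % n ; right = -(n - (right+1) % n)
  let left' := PySem.Int.mod left n
  let right' := -(n - PySem.Int.mod (right + 1) n)
  if right' = -n then PySem.List.slice answer (some left') none
  else PySem.List.slice answer (some left') (some right')

-- ===== PORT B =====
def solution_alt (n : Int) (left : Int) (right : Int) : List Int :=
  (PySem.List.pyRange left (right + 1) 1).map
    (fun k => max (PySem.Int.floordiv k n) (PySem.Int.mod k n) + 1)

-- ===== PRECONDITION & SPEC =====
-- Pre_ admits the inputs on which A computes the intended n×n-matrix slice (1 ≤ n, -n ≤ left, right < n²,
-- where A's wrapped row indices still denote the right rows), the requests A answers with [] exactly as B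
-- does (empty windows, windows entirely below row -n, and n ≤ -1 with 1 ≤ right < left or left = right = 0),
-- and the out-of-matrix requests covered by D_ below; A raises ZeroDivisionError for n = 0, and on the
-- remaining excluded inputs (negative n with a nonempty request, or left below -n) A's negative-index/slice
-- arithmetic returns accidental wrapped or clamped fragments that are artefacts of its implementation.
-- D_: on nonempty requests starting inside [0,n²) whose right end lies at or past n², A keeps emitting rows
-- past the matrix (row index i > n contributes [i]*i and an empty arr[i:]), returning padded garbage such as
-- [2, 2] for (1, 1, 1); B returns the closed-form entry max(k//n,k%n)+1 for exactly the requested indices,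
-- the intended continuation of the matrix pattern.
def D_solution (n : Int) (left : Int) (right : Int) : Prop :=
  1 ≤ n ∧ 0 ≤ left ∧ left ≤ right ∧ n * n ≤ right
instance (n : Int) (left : Int) (right : Int) : Decidable (D_solution n left right) := by
  unfold D_solution; infer_instance
def Pre_solution (n : Int) (left : Int) (right : Int) : Prop :=
  (1 ≤ n ∧ (((-n ≤ left ∨ right < left) ∧
      (right < n * n ∨ PySem.Int.floordiv right n < PySem.Int.floordiv left n)) ∨
    right < -(n * n))) ∨
  (n ≤ -1 ∧ 1 ≤ right ∧ right < left) ∨ (n = 1 ∧ right ≤ 0) ∨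
  (n ≤ -1 ∧ left = 0 ∧ right = 0) ∨ D_solution n left right
instance (n : Int) (left : Int) (right : Int) : Decidable (Pre_solution n left right) := by
  unfold Pre_solution; infer_instance
def pvWitness_solution : Int × Int × Int := (3, 2, 5)
def Spec_solution (n : Int) (left : Int) (right : Int) (out : List Int) : Prop := ¬ D_solution n left right → out = solution_alt n left right
instance (n : Int) (left : Int) (right : Int) (out : List Int) : Decidable (Spec_solution n left right out) := by unfold Spec_solution; infer_instance
def pvDiffWitness_solution : Int × Int × Int := (1, 1, 1)
def pvDiffWitnessOut_solution : (List Int) × (List Int) := ([2, 2], [2])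

-- ===== CLAIM (what is proved, stated in full; the proofs are below) =====
def Claim_unchanged_solution : Prop := ∀ (n : Int) (left : Int) (right : Int), Dom_solution n left right → Pre_solution n left right → Spec_solution n left right (solution n left right)
def Claim_changed_solution : Prop := Dom_solution (pvDiffWitness_solution.1) (pvDiffWitness_solution.2.1) (pvDiffWitness_solution.2.2) ∧ Pre_solution (pvDiffWitness_solution.1) (pvDiffWitness_solution.2.1) (pvDiffWitness_solution.2.2) ∧ D_solution (pvDiffWitness_solution.1) (pvDiffWitness_solution.2.1) (pvDiffWitness_solution.2.2) ∧ solution (pvDiffWitness_solution.1) (pvDiffWitness_solution.2.1) (pvDiffWitness_solution.2.2) = pvDiffWitnessOut_solution.1 ∧ solution_alt (pvDiffWitness_solution.1) (pvDiffWitness_solution.2.1) (pvDiffWitness_solution.2.2) = pvDiffWitnessOut_solution.2 ∧ pvDiffWitnessOut_solution.1 ≠ pvDiffWitnessOut_solution.2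

-- ===== LEMMAS AND PROOFS =====

-- the per-index value B computes, and the body of A's loop for row index i
def pvEntry (n k : Int) : Int := max (PySem.Int.floordiv k n) (PySem.Int.mod k n) + 1

def pvRow (n i : Int) : List Int :=
  List.replicate i.toNat i ++ PySem.List.slice (PySem.List.pyRange 1 (n + 1) 1) (some i) none


lemma pvEntry_block (n i k : Int) (hn : 1 ≤ n) (hk0 : 0 ≤ k) (hk : k < n) :
    pvEntry n (n * (i - 1) + k) = max (i - 1) k + 1 := by
  have hq : PySem.Int.floordiv (n * (i - 1) + k) n = i - 1 := by
    rw [PySem.Int.floordiv_eq_iff_of_pos (by omega)]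
    constructor <;> nlinarith
  have hm : PySem.Int.mod (n * (i - 1) + k) n = k := by
    have h := PySem.Int.floordiv_mul_add_mod (n * (i - 1) + k) n
    rw [hq, mul_comm] at h; omega
  simp [pvEntry, hq, hm]


lemma pvRow_eq (n i : Int) (hn : 1 ≤ n) (h1 : 1 ≤ i) (h2 : i ≤ n) :
    pvRow n i = (PySem.List.pyRange (n * (i - 1)) (n * i) 1).map (pvEntry n) := by
  rw [pvRow, PySem.List.slice_from _ (by omega), PySem.List.pyRange_one, PySem.List.pyRange_one]
  have hni : n * i - n * (i - 1) = n := by ring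
  rw [hni]
  have hlen : (n + 1 - 1).toNat = n.toNat := by omega
  rw [hlen]
  apply List.ext_getElem
  · simp; omega
  · intro j h1' h2'
    have hjn : j < n.toNat := by simpa using h2'
    simp only [List.getElem_map, List.getElem_range]
    by_cases hji : j < i.toNat
    · rw [List.getElem_append_left (by simpa using hji)]
      rw [pvEntry_block n i j hn (by omega) (by omega)]
      simp
      omega
    · rw [List.getElem_append_right (by simp; omega)]
      simp only [List.length_replicate, List.getElem_drop, List.getElem_map, List.getElem_range]
      rw [pvEntry_block n i j hn (by omega) (by omega)]
      push_cast
      omega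


lemma pvRow_eq_arr (n i : Int) (hn : 1 ≤ n) (hgood : i ≤ -n ∨ i = 0) :
    pvRow n i = (PySem.List.pyRange (n * (i - 1)) (n * i) 1).map (pvEntry n) := by
  have hi0 : i ≤ 0 := by omega
  have harr : pvRow n i = PySem.List.pyRange 1 (n + 1) 1 := by
    rw [pvRow, show i.toNat = 0 by omega, PySem.List.slice_some_none,
      show PySem.List.clampIdx (PySem.List.pyRange 1 (n + 1) 1).length i = 0 by
        rw [PySem.List.length_pyRange_one]
        simp only [PySem.List.clampIdx]
        split_ifs <;> omega]
    simp
  rw [harr, PySem.List.pyRange_one, PySem.List.pyRange_one,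
    show n * i - n * (i - 1) = n by ring, show n + 1 - 1 = n by ring]
  apply List.ext_getElem
  · simp
  · intro j h1' h2'
    simp only [List.getElem_map, List.getElem_range]
    rw [pvEntry_block n i j hn (by omega) (by simp at h1'; omega)]
    rw [max_eq_right (show i - 1 ≤ (j:Int) by omega)]
    ring


lemma pvRow_eq_good (n i : Int) (hn : 1 ≤ n) (h : i ≤ -n ∨ (0 ≤ i ∧ i ≤ n)) :
    pvRow n i = (PySem.List.pyRange (n * (i - 1)) (n * i) 1).map (pvEntry n) := by
  rcases h with h | ⟨h0, hub⟩
  · exact pvRow_eq_arr n i hn (Or.inl h)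
  · rcases eq_or_lt_of_le h0 with h1 | h1
    · exact pvRow_eq_arr n i hn (Or.inr h1.symm)
    · exact pvRow_eq n i hn (by omega) hub


lemma pvRows_eq (n : Int) (hn : 1 ≤ n) :
    ∀ (m : Nat) (a : Int), (a + m ≤ -n ∨ (-1 ≤ a ∧ a + m ≤ n)) →
    (PySem.List.pyRange (a + 1) (a + m + 1) 1).flatMap (pvRow n)
      = (PySem.List.pyRange (n * a) (n * (a + m)) 1).map (pvEntry n) := by
  intro m
  induction m with
  | zero =>
    intro a _
    simp [PySem.List.pyRange_one_eq_nil]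
  | succ m ih =>
    intro a hb
    push_cast at hb
    rw [PySem.List.pyRange_one_cons (by omega), List.flatMap_cons]
    have hrec := ih (a + 1) (by omega)
    rw [show a + 1 + (m : Int) = a + ((m + 1 : Nat) : Int) by push_cast; ring] at hrec
    rw [hrec, pvRow_eq_good n (a + 1) hn (by omega)]
    rw [show a + 1 - 1 = a by ring]
    rw [PySem.List.pyRange_one_append (n * a) (n * (a + 1)) (n * (a + (m + 1 : Nat)))
        (by nlinarith) (by push_cast; nlinarith), List.map_append]


lemma slice_middle {α : Type} (P1 P2 P3 : List α) (a b : Int)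
    (ha : a = (P1.length : Int)) (hb : b = -(P3.length : Int)) (h3 : 0 < P3.length) :
    PySem.List.slice (P1 ++ P2 ++ P3) (some a) (some b) = P2 := by
  subst ha hb
  simp only [PySem.List.slice, PySem.List.clampIdx, List.length_append]
  rw [if_neg (show ¬((P1.length : Int) < 0) by omega),
      if_pos (show -((P3.length : Int)) < 0 by omega),
      if_neg (show ¬(((P1.length + P2.length + P3.length : Nat) : Int) + -(P3.length : Int) < 0) by push_cast; omega)]
  rw [show min (P1.length : Int).toNat (P1.length + P2.length + P3.length) = P1.length by omega,
      show (((P1.length + P2.length + P3.length : Nat) : Int) + -(P3.length : Int)).toNat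
        = P1.length + P2.length by push_cast; omega]
  rw [List.append_assoc, List.drop_left,
      show P1.length + P2.length - P1.length = P2.length by omega, List.take_left]


lemma slice_empty {α : Type} (xs : List α) (a b : Int) (ha : 0 ≤ a) (hb : b < 0)
    (h : (xs.length : Int) + b ≤ a) :
    PySem.List.slice xs (some a) (some b) = [] := by
  simp only [PySem.List.slice, PySem.List.clampIdx]
  rw [if_pos hb, if_neg (show ¬(a < 0) by omega)]
  split_ifs with h2
  · simp
  · rw [show ((xs.length : Int) + b).toNat - min a.toNat xs.length = 0 by omega]
    simp


lemma solution_eq_neg (n left right : Int) (hn : n ≤ -1) (hr1 : 1 ≤ right)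
    (hrl : right < left) : solution n left right = solution_alt n left right := by
  have hhi : PySem.Int.floordiv right n * n + PySem.Int.mod right n = right :=
    PySem.Int.floordiv_mul_add_mod right n
  obtain ⟨hm1, hm2⟩ := PySem.Int.mod_neg_bounds right (show n < 0 by omega)
  have hhineg : PySem.Int.floordiv right n ≤ -1 := by nlinarith
  have harr : PySem.List.pyRange 1 (n + 1) 1 = [] :=
    PySem.List.pyRange_one_eq_nil (by omega)
  have hbody : (PySem.List.pyRange (PySem.Int.floordiv left n + 1)
      (PySem.Int.floordiv right n + 2) 1).flatMap (pvRow n) = [] := by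
    rw [List.flatMap_eq_nil_iff]
    intro i hi
    rw [PySem.List.mem_pyRange_one] at hi
    rw [pvRow, harr, show i.toNat = 0 by omega]
    simp [PySem.List.slice]
  have hfold : solution n left right =
      (if -(n - PySem.Int.mod (right + 1) n) = -n then
        PySem.List.slice ((PySem.List.pyRange (PySem.Int.floordiv left n + 1)
            (PySem.Int.floordiv right n + 2) 1).flatMap (pvRow n))
          (some (PySem.Int.mod left n)) none
      else
        PySem.List.slice ((PySem.List.pyRange (PySem.Int.floordiv left n + 1)
            (PySem.Int.floordiv right n + 2) 1).flatMap (pvRow n))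
          (some (PySem.Int.mod left n)) (some (-(n - PySem.Int.mod (right + 1) n)))) := by
    simp only [solution, PySem.List.foldl_append_eq_flatMap, List.nil_append]
    rfl
  rw [hfold, hbody,
    show solution_alt n left right
      = (PySem.List.pyRange left (right + 1) 1).map (pvEntry n) from rfl,
    PySem.List.pyRange_one_eq_nil (show right + 1 ≤ left by omega), List.map_nil]
  split_ifs <;> simp [PySem.List.slice]


lemma floordiv_one (x : Int) : PySem.Int.floordiv x 1 = x := by
  rw [PySem.Int.floordiv_eq_iff_of_pos one_pos]; omega


lemma mod_one (x : Int) : PySem.Int.mod x 1 = 0 := by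
  have h := PySem.Int.floordiv_mul_add_mod x 1
  rw [floordiv_one] at h; omega


lemma flatMap_const {α β : Type} (l : List α) (f : α → List β) (a : β)
    (h : ∀ i ∈ l, f i = [a]) : l.flatMap f = l.map (fun _ => a) := by
  induction l with
  | nil => rfl
  | cons x xs ih =>
    rw [List.flatMap_cons, List.map_cons, h x (by simp),
      ih (fun i hi => h i (by simp [hi]))]
    rfl


lemma solution_eq_one (left right : Int) (hr : right ≤ 0) :
    solution 1 left right = solution_alt 1 left right := by
  have hrow : ∀ i ∈ PySem.List.pyRange (PySem.Int.floordiv left 1 + 1)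
      (PySem.Int.floordiv right 1 + 2) 1, pvRow 1 i = [(1:Int)] := by
    intro i hi
    rw [PySem.List.mem_pyRange_one, floordiv_one, floordiv_one] at hi
    have harr : PySem.List.pyRange 1 (1 + 1) 1 = [(1:Int)] := PySem.List.pyRange_one_singleton 1
    rw [pvRow, harr]
    by_cases h1 : i = 1
    · subst h1
      rw [PySem.List.slice_from _ (by omega)]
      rfl
    · rw [show i.toNat = 0 by omega, PySem.List.slice_some_none,
        show PySem.List.clampIdx [(1:Int)].length i = 0 by
          simp [PySem.List.clampIdx]; split_ifs <;> omega]
      rfl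
  have hfold : solution 1 left right =
      (if -(1 - PySem.Int.mod (right + 1) 1) = -1 then
        PySem.List.slice ((PySem.List.pyRange (PySem.Int.floordiv left 1 + 1)
            (PySem.Int.floordiv right 1 + 2) 1).flatMap (pvRow 1))
          (some (PySem.Int.mod left 1)) none
      else
        PySem.List.slice ((PySem.List.pyRange (PySem.Int.floordiv left 1 + 1)
            (PySem.Int.floordiv right 1 + 2) 1).flatMap (pvRow 1))
          (some (PySem.Int.mod left 1)) (some (-(1 - PySem.Int.mod (right + 1) 1)))) := by
    simp only [solution, PySem.List.foldl_append_eq_flatMap, List.nil_append]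
    rfl
  rw [hfold, if_pos (by rw [mod_one]; norm_num), mod_one,
    PySem.List.slice_from _ le_rfl, Int.toNat_zero, List.drop_zero,
    flatMap_const _ _ _ hrow, floordiv_one, floordiv_one,
    show solution_alt 1 left right
      = (PySem.List.pyRange left (right + 1) 1).map (pvEntry 1) from rfl,
    PySem.List.pyRange_one, PySem.List.pyRange_one, List.map_map, List.map_map,
    show (right + 2 - (left + 1)) = (right + 1 - left) by ring]
  apply List.map_congr_left
  intro k hk
  rw [List.mem_range] at hk
  simp only [Function.comp]
  rw [pvEntry, floordiv_one, mod_one]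
  omega


lemma solution_eq_zero (n : Int) (hn : n ≤ -1) : solution n 0 0 = solution_alt n 0 0 := by
  have hn0 : n < 0 := by omega
  have hf0 : PySem.Int.floordiv 0 n = 0 := by
    have h := PySem.Int.floordiv_mul_add_mod 0 n
    obtain ⟨hm1, hm2⟩ := PySem.Int.mod_neg_bounds 0 hn0
    nlinarith [PySem.Int.floordiv_mul_add_mod 0 n]
  have hm0 : PySem.Int.mod 0 n = 0 := by
    have h := PySem.Int.floordiv_mul_add_mod 0 n
    rw [hf0] at h; omega
  have hf1 : PySem.Int.floordiv 1 n = -1 := by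
    obtain ⟨hm1, hm2⟩ := PySem.Int.mod_neg_bounds 1 hn0
    have h := PySem.Int.floordiv_mul_add_mod 1 n
    by_contra hcon
    rcases lt_or_gt_of_ne hcon with hlt | hgt
    · nlinarith
    · nlinarith
  have hm1 : PySem.Int.mod 1 n = 1 + n := by
    have h := PySem.Int.floordiv_mul_add_mod 1 n
    rw [hf1] at h; omega
  have harr : PySem.List.pyRange 1 (n + 1) 1 = [] := PySem.List.pyRange_one_eq_nil (by omega)
  have hrow : pvRow n 1 = [(1:Int)] := by
    rw [pvRow, harr]
    simp [PySem.List.slice]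
  have hfold : solution n 0 0 =
      (if -(n - PySem.Int.mod (0 + 1) n) = -n then
        PySem.List.slice ((PySem.List.pyRange (PySem.Int.floordiv 0 n + 1)
            (PySem.Int.floordiv 0 n + 2) 1).flatMap (pvRow n))
          (some (PySem.Int.mod 0 n)) none
      else
        PySem.List.slice ((PySem.List.pyRange (PySem.Int.floordiv 0 n + 1)
            (PySem.Int.floordiv 0 n + 2) 1).flatMap (pvRow n))
          (some (PySem.Int.mod 0 n)) (some (-(n - PySem.Int.mod (0 + 1) n)))) := by
    simp only [solution, PySem.List.foldl_append_eq_flatMap, List.nil_append]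
    rfl
  have hrange : PySem.List.pyRange (PySem.Int.floordiv 0 n + 1) (PySem.Int.floordiv 0 n + 2) 1
      = [(1:Int)] := by
    rw [hf0]
    decide
  have halt : solution_alt n 0 0 = [(1:Int)] := by
    rw [show solution_alt n 0 0
        = (PySem.List.pyRange 0 (0 + 1) 1).map (pvEntry n) from rfl,
      PySem.List.pyRange_one_singleton]
    simp [pvEntry, hf0, hm0]
  rw [hfold, hrange, List.flatMap_singleton, hrow, halt, show (0:Int) + 1 = 1 by ring, hm1, hm0]
  by_cases hc : -(n - (1 + n)) = -n
  · rw [if_pos hc, PySem.List.slice_from _ le_rfl]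
    rfl
  · rw [if_neg hc]
    have hn2 : n ≤ -2 := by omega
    simp only [PySem.List.slice, PySem.List.clampIdx]
    rw [show -(n - (1 + n)) = 1 by ring]
    norm_num


theorem solution_eq (n left right : Int)
    (h : (1 ≤ n ∧ (((-n ≤ left ∨ right < left) ∧
            (right < n * n ∨ PySem.Int.floordiv right n < PySem.Int.floordiv left n)) ∨
          right < -(n * n))) ∨
        (n ≤ -1 ∧ 1 ≤ right ∧ right < left) ∨ (n = 1 ∧ right ≤ 0) ∨
        (n ≤ -1 ∧ left = 0 ∧ right = 0)) :
    solution n left right = solution_alt n left right := by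
  rcases h with ⟨hn, hcond⟩ | ⟨hn, hr1, hrl⟩ | ⟨hn, hr1⟩ | ⟨hn, hl0, hr0⟩
  case inr.inl => exact solution_eq_neg n left right hn hr1 hrl
  case inr.inr.inl => exact hn ▸ solution_eq_one left right hr1
  case inr.inr.inr => subst hl0 hr0; exact solution_eq_zero n hn
  have hn0 : (0:Int) < n := by omega
  set lo := PySem.Int.floordiv left n with hlo_def
  set hi := PySem.Int.floordiv right n with hhi_def
  obtain ⟨hL1, hL2⟩ := (PySem.Int.floordiv_eq_iff_of_pos hn0).mp hlo_def.symm
  obtain ⟨hH1, hH2⟩ := (PySem.Int.floordiv_eq_iff_of_pos hn0).mp hhi_def.symm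
  rw [add_mul, one_mul] at hL2 hH2
  have hmodL : PySem.Int.mod left n = left - lo * n := by
    have h := PySem.Int.floordiv_mul_add_mod left n
    rw [← hlo_def] at h; omega
  have hmodLnn := PySem.Int.mod_nonneg left hn0
  have hmodLlt := PySem.Int.mod_lt left hn0
  -- the loop = flatMap of rows
  have hfold : solution n left right =
      (if -(n - PySem.Int.mod (right + 1) n) = -n then
        PySem.List.slice ((PySem.List.pyRange (lo + 1) (hi + 2) 1).flatMap (pvRow n))
          (some (PySem.Int.mod left n)) none
      else
        PySem.List.slice ((PySem.List.pyRange (lo + 1) (hi + 2) 1).flatMap (pvRow n))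
          (some (PySem.Int.mod left n)) (some (-(n - PySem.Int.mod (right + 1) n)))) := by
    simp only [solution, PySem.List.foldl_append_eq_flatMap, List.nil_append]
    rfl
  rw [hfold]; clear hfold
  set rem := PySem.Int.mod (right + 1) n with hrem_def
  set q := PySem.Int.floordiv (right + 1) n with hq_def
  obtain ⟨hQ1, hQ2⟩ := (PySem.Int.floordiv_eq_iff_of_pos hn0).mp hq_def.symm
  rw [add_mul, one_mul] at hQ2
  have hremq : rem = right + 1 - q * n := by
    have h := PySem.Int.floordiv_mul_add_mod (right + 1) n
    rw [← hq_def] at h; omega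
  have hremnn : 0 ≤ rem := PySem.Int.mod_nonneg (right + 1) hn0
  have hremlt : rem < n := PySem.Int.mod_lt (right + 1) hn0
  have halt : solution_alt n left right = (PySem.List.pyRange left (right + 1) 1).map (pvEntry n) := rfl
  rw [halt]; clear halt
  have e1 : (hi + 1) * n = hi * n + n := by ring
  have hnn : 0 < n * n := by positivity
  by_cases hlr : left ≤ right
  · -- the requested window is nonempty
    have hlohi : lo ≤ hi := by
      have : lo < hi + 1 := lt_of_mul_lt_mul_right (show lo * n < (hi + 1) * n by omega) hn0.le
      omega
    have hgood : hi + 1 ≤ -n ∨ (-1 ≤ lo ∧ hi + 1 ≤ n) := by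
      rcases hcond with ⟨hor, hor2⟩ | hd
      · have hl : -n ≤ left := by rcases hor with h | h <;> omega
        have hr : right < n * n := by rcases hor2 with h | h <;> omega
        have hlo1 : -1 ≤ lo := by by_contra hcon; simp only [not_le] at hcon; nlinarith
        have hhin : hi < n := lt_of_mul_lt_mul_right (show hi * n < n * n by omega) hn0.le
        omega
      · have : hi < -n := by by_contra hcon; simp only [not_lt] at hcon; nlinarith
        omega
    have hr : right < n * n := by
      rcases hgood with hg | ⟨hg1, hg2⟩
      · nlinarith
      · nlinarith
    have hm : lo + ((hi + 1 - lo).toNat : Int) = hi + 1 := by omega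
    have hrows := pvRows_eq n hn ((hi + 1 - lo).toNat) lo (by rw [hm]; omega)
    rw [show lo + ((hi + 1 - lo).toNat : Int) + 1 = hi + 2 by omega, hm] at hrows
    rw [hrows]; clear hrows
    by_cases hc : -(n - rem) = -n
    · -- rem = 0 : the slice keeps everything from left on; the block ends exactly at right+1
      have hrem0 : rem = 0 := by omega
      have hq_le : q ≤ hi + 1 := le_of_mul_le_mul_right (show q * n ≤ (hi + 1) * n by omega) hn0
      have hq_gt : hi < q := lt_of_mul_lt_mul_right (show hi * n < q * n by omega) hn0.le
      have hqhi : q = hi + 1 := by omega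
      have hend : n * (hi + 1) = right + 1 := by
        have e4 : n * (hi + 1) = (hi + 1) * n := mul_comm _ _
        have h3 : q * n = (hi + 1) * n := by rw [hqhi]
        omega
      have hnl : n * lo = lo * n := mul_comm _ _
      rw [if_pos hc, hend,
        PySem.List.pyRange_one_append (n * lo) left (right + 1) (by omega) (by omega),
        List.map_append,
        PySem.List.slice_from _ hmodLnn,
        show (PySem.Int.mod left n).toNat =
          ((PySem.List.pyRange (n * lo) left 1).map (pvEntry n)).length by
            simp [PySem.List.length_pyRange_one]; omega,
        List.drop_left]
    · -- 0 < rem < n : the negative stop trims exactly the tail past right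
      have hrempos : 0 < rem := by omega
      have hq_le : q ≤ hi := by
        have : q < hi + 1 := lt_of_mul_lt_mul_right (show q * n < (hi + 1) * n by omega) hn0.le
        omega
      have hq_ge : hi ≤ q := by
        have e2 : (q + 1) * n = q * n + n := by ring
        have : hi < q + 1 := lt_of_mul_lt_mul_right (show hi * n < (q + 1) * n by omega) hn0.le
        omega
      have hqhi : hi = q := by omega
      have hend : n * (hi + 1) = (right + 1) + (n - rem) := by
        have e4 : n * (hi + 1) = (hi + 1) * n := mul_comm _ _
        have h3 : hi * n = q * n := by rw [hqhi]
        omega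
      have hnl : n * lo = lo * n := mul_comm _ _
      rw [if_neg hc, hend,
        PySem.List.pyRange_one_append (n * lo) left ((right + 1) + (n - rem)) (by omega) (by omega),
        PySem.List.pyRange_one_append left (right + 1) ((right + 1) + (n - rem)) (by omega) (by omega),
        ← List.append_assoc, List.map_append, List.map_append]
      apply slice_middle
      · simp [PySem.List.length_pyRange_one]; omega
      · simp [PySem.List.length_pyRange_one]; omega
      · simp [PySem.List.length_pyRange_one]; omega
  · -- left > right : B's range is empty, and A's slicing empties its answer too
    rw [PySem.List.pyRange_one_eq_nil (show right + 1 ≤ left by omega), List.map_nil]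
    have hhilo : hi ≤ lo := by
      rw [hhi_def, hlo_def]
      exact (PySem.Int.le_floordiv_iff_mul_le hn0).mpr (by rw [← hhi_def]; omega)
    by_cases hcase : hi < lo
    · -- the row loop itself is empty
      rw [PySem.List.pyRange_one_eq_nil (show hi + 2 ≤ lo + 1 by omega), List.flatMap_nil]
      split_ifs <;>
        simp [PySem.List.slice]
    · -- lo = hi : a single row is built, but the slice window inside it is empty
      have hlohi : lo = hi := by omega
      have hr : right < n * n := by
        rcases hcond with ⟨hor, hor2⟩ | hd
        · rcases hor2 with h | h <;> omega
        · omega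
      have hhin : hi < n := lt_of_mul_lt_mul_right (show hi * n < n * n by omega) hn0.le
      have hc : ¬(-(n - rem) = -n) := by
        intro hcontra
        have hrem0 : rem = 0 := by omega
        have hq_gt : hi < q := lt_of_mul_lt_mul_right (show hi * n < q * n by omega) hn0.le
        have hq_le : q ≤ hi + 1 := le_of_mul_le_mul_right (show q * n ≤ (hi + 1) * n by omega) hn0
        have hqhi : q = hi + 1 := by omega
        have h3 : q * n = (hi + 1) * n := by rw [hqhi]
        rw [hlohi] at hL2
        omega
      have hrempos : 0 < rem := by omega
      have hq_le : q ≤ hi := by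
        have : q < hi + 1 := lt_of_mul_lt_mul_right (show q * n < (hi + 1) * n by omega) hn0.le
        omega
      have hq_ge : hi ≤ q := by
        have e2 : (q + 1) * n = q * n + n := by ring
        have : hi < q + 1 := lt_of_mul_lt_mul_right (show hi * n < (q + 1) * n by omega) hn0.le
        omega
      have hqeq : q = hi := by omega
      have h3 : q * n = lo * n := by rw [hqeq, ← hlohi]
      rw [if_neg hc]
      by_cases hlo0 : 0 ≤ lo
      · -- the row is a full row of the matrix
        have hrows := pvRows_eq n hn 1 lo (by push_cast; omega)
        rw [show lo + ((1:Nat) : Int) + 1 = hi + 2 by push_cast; omega,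
            show lo + ((1:Nat) : Int) = lo + 1 by push_cast; ring] at hrows
        rw [hrows]; clear hrows
        apply slice_empty
        · exact hmodLnn
        · omega
        · simp [PySem.List.length_pyRange_one]
          rw [show n * (lo + 1) - n * lo = n by ring]
          omega
      · -- lo < 0 : the single 'row' is at most n long, and the window past it is empty
        rw [show hi + 2 = (lo + 1) + 1 by omega, PySem.List.pyRange_one_singleton,
          List.flatMap_singleton]
        have hlen : ((pvRow n (lo + 1)).length : Int) ≤ n := by
          rw [pvRow, PySem.List.slice_some_none]
          simp [show (lo + 1).toNat = 0 by omega, PySem.List.pyRange_one]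
          omega
        apply slice_empty
        · exact hmodLnn
        · omega
        · omega

-- ===== VERDICT (by name: the statement is the Claim_ definition above) =====
theorem solution_spec : Claim_unchanged_solution := by
  intro n left right _ hpre hnD
  rcases hpre with h | h | h | h | h
  · exact solution_eq n left right (Or.inl h)
  · exact solution_eq n left right (Or.inr (Or.inl h))
  · exact solution_eq n left right (Or.inr (Or.inr (Or.inl h)))
  · exact solution_eq n left right (Or.inr (Or.inr (Or.inr h)))
  · exact absurd h hnD

theorem solution_changed : Claim_changed_solution := by unfold Claim_changed_solution; decide
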